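-- pv_equiv track=rewrite | github.com/sixtexteditors/xer-to-smartsheet | backend/xer_parser.py | _parse_taskrsrc
-- ===== SOURCE A (Python) =====
-- from collections import defaultdict
--
-- def _parse_taskrsrc(rows, rsrc_map):
--     result = defaultdict(list)
--     for row in rows:
--         task_id = row.get("task_id", "")
--         rsrc_name = rsrc_map.get(row.get("rsrc_id", ""), "")
--         if rsrc_name and rsrc_name not in result[task_id]:
--             result[task_id].append(rsrc_name)
--     return result
-- ===== SOURCE B (Python) =====
-- from collections import defaultdict
--
-- def _parse_taskrsrc(rows, rsrc_map):
--     # Flatten to (task_id, rsrc_name) pairs, keeping only truthy names.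
--     pairs = [(row.get("task_id", ""), rsrc_map.get(row.get("rsrc_id", ""), ""))
--              for row in rows]
--     pairs = [(t, n) for (t, n) in pairs if n]
--     # For each distinct task id (first-appearance order), collect its names
--     # in order and dedup them once.
--     result = defaultdict(list)
--     for t in dict.fromkeys(t for t, _ in pairs):
--         result[t] = list(dict.fromkeys(n for t2, n in pairs if t2 == t))
--     return result
-- ===== Notes on version B (the rewrite author's own statement) =====
-- stated objective: alternative
-- what changed: A builds the grouped dict incrementally with a membership-checked append per row; B never groups incrementally: it flattens rows to a filtered (task_id, name) pair list, then for each distinct task id computes its deduped name list with one per-key pass over the pairs.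
import Mathlib
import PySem

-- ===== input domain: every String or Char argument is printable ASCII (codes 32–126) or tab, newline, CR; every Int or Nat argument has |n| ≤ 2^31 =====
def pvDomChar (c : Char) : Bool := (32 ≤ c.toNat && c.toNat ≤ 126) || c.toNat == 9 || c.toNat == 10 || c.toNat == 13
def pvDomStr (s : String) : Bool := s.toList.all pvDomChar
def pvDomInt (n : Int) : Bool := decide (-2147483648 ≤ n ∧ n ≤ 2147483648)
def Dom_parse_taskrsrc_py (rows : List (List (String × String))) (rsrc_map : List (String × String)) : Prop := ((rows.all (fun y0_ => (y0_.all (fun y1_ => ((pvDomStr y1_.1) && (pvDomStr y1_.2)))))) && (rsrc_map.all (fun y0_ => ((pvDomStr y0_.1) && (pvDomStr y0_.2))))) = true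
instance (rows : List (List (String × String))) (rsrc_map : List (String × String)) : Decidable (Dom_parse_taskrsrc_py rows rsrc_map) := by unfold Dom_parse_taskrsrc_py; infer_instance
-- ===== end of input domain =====

-- B abandons A's incremental membership-checked grouping dict: it flattens the rows to a
-- filtered (task_id, name) pair list and then, per DISTINCT task id, computes that task's
-- deduped name list with one pass over the pairs. Both are total; A = B everywhere
-- (equivalence on the returned dict's items).

-- ===== PORT A =====
-- d.get(k, "") on a Python dict passed as an association list: first match wins.
def pvLookup (m : List (String × String)) (k : String) : String :=
  (PySem.Dict.mk m).getD k ""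

-- one iteration of A's loop body ('result[task_id]' is only evaluated when rsrc_name is
-- truthy; when rsrc_name ∈ result[task_id] the defaultdict entry already exists, so the
-- dict is unchanged)
def pvStepA (rsrc_map : List (String × String)) (d : PySem.Dict String (List String))
    (row : List (String × String)) : PySem.Dict String (List String) :=
  let task_id := pvLookup row "task_id"
  let rsrc_name := pvLookup rsrc_map (pvLookup row "rsrc_id")
  if rsrc_name ≠ "" then
    let cur := d.getD task_id []
    if rsrc_name ∈ cur then d else d.insert task_id (cur ++ [rsrc_name])
  else d

def parse_taskrsrc_py (rows : List (List (String × String))) (rsrc_map : List (String × String)) : List (String × List String) :=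
  (rows.foldl (pvStepA rsrc_map) PySem.Dict.empty).items

-- ===== PORT B =====
-- the (task_id, rsrc_name) pair of one row (B's first comprehension, elementwise)
def pvPair (rsrc_map : List (String × String)) (row : List (String × String)) : String × String :=
  ((PySem.Dict.mk row).getD "task_id" "",
   (PySem.Dict.mk rsrc_map).getD ((PySem.Dict.mk row).getD "rsrc_id" "") "")

def parse_taskrsrc_py_alt (rows : List (List (String × String))) (rsrc_map : List (String × String)) : List (String × List String) :=
  let pairs := (rows.map (pvPair rsrc_map)).filter (fun q => q.2 != "")
  (PySem.List.dedup (pairs.map Prod.fst)).map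
    (fun t => (t, PySem.List.dedup ((pairs.filter (fun q => q.1 == t)).map Prod.snd)))

-- ===== PRECONDITION & SPEC =====
def Spec_parse_taskrsrc_py (rows : List (List (String × String))) (rsrc_map : List (String × String)) (out : List (String × List String)) : Prop := out = parse_taskrsrc_py_alt rows rsrc_map
instance (rows : List (List (String × String))) (rsrc_map : List (String × String)) (out : List (String × List String)) : Decidable (Spec_parse_taskrsrc_py rows rsrc_map out) := by unfold Spec_parse_taskrsrc_py; infer_instance

-- ===== CLAIM (what is proved, stated in full; the proofs are below) =====
def Claim_equal_parse_taskrsrc_py : Prop := ∀ (rows : List (List (String × String))) (rsrc_map : List (String × String)), Dom_parse_taskrsrc_py rows rsrc_map → Spec_parse_taskrsrc_py rows rsrc_map (parse_taskrsrc_py rows rsrc_map)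

-- ===== LEMMAS AND PROOFS =====

-- B's closed-form grouped table of a pair list
def pvSpecTbl (p : List (String × String)) : List (String × List String) :=
  (PySem.List.dedup (p.map Prod.fst)).map
    (fun t => (t, PySem.List.dedup ((p.filter (fun q => q.1 == t)).map Prod.snd)))

-- A's step, re-expressed on an already-derived truthy pair
def pvStepP (d : PySem.Dict String (List String)) (q : String × String) : PySem.Dict String (List String) :=
  let cur := d.getD q.1 []
  if q.2 ∈ cur then d else d.insert q.1 (cur ++ [q.2])

-- appending one element to a list, then deduping, is the membership-checked append on the dedup
theorem pv_dedup_append_singleton (xs : List String) (x : String) :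
    PySem.List.dedup (xs ++ [x])
      = if x ∈ xs then PySem.List.dedup xs else PySem.List.dedup xs ++ [x] := by
  simp only [PySem.List.dedup_eq_ofList, PySem.Set.ofList_append_singleton]
  by_cases h : x ∈ xs
  · rw [PySem.Set.add_of_mem ((PySem.Set.mem_ofList xs x).2 h)]
    simp [h]
  · rw [PySem.Set.add_of_not_mem (fun hm => h ((PySem.Set.mem_ofList xs x).1 hm))]
    simp [h]

-- lookup in a dict whose items are a keyed map over a nodup key list
theorem pv_get?_keyed_map (ks : List String) (g : String → List String) (k : String)
    (hnd : ks.Nodup) :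
    (PySem.Dict.mk (ks.map (fun a => (a, g a)))).get? k
      = if k ∈ ks then some (g k) else none := by
  induction ks with
  | nil => rfl
  | cons a rest ih =>
      simp only [List.map_cons, PySem.Dict.get?_mk_cons]
      rcases List.nodup_cons.1 hnd with ⟨-, hrest⟩
      by_cases h : a = k
      · subst h; simp
      · rw [if_neg (by simpa using h), ih hrest]
        by_cases hk : k ∈ rest
        · rw [if_pos hk, if_pos (List.mem_cons_of_mem _ hk)]
        · rw [if_neg hk, if_neg (by simp [Ne.symm h, hk])]

theorem pv_getD_keyed_map (ks : List String) (g : String → List String) (k : String)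
    (hnd : ks.Nodup) :
    (PySem.Dict.mk (ks.map (fun a => (a, g a)))).getD k []
      = if k ∈ ks then g k else [] := by
  rw [PySem.Dict.getD_eq_get?_getD, pv_get?_keyed_map ks g k hnd]
  by_cases hk : k ∈ ks <;> simp [hk]

theorem pv_contains_keyed_map (ks : List String) (g : String → List String) (k : String)
    (hnd : ks.Nodup) :
    (PySem.Dict.mk (ks.map (fun a => (a, g a)))).contains k = decide (k ∈ ks) := by
  rw [PySem.Dict.contains_eq_isSome_get?, pv_get?_keyed_map ks g k hnd]
  by_cases hk : k ∈ ks <;> simp [hk]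

-- one pair extends the closed-form table exactly as A's step extends the dict
theorem pv_step_tbl (p : List (String × String)) (q : String × String) :
    pvStepP (PySem.Dict.mk (pvSpecTbl p)) q = PySem.Dict.mk (pvSpecTbl (p ++ [q])) := by
  obtain ⟨t, n⟩ := q
  have hnd : (PySem.List.dedup (p.map Prod.fst)).Nodup := PySem.List.nodup_dedup _
  set ks := PySem.List.dedup (p.map Prod.fst) with hks
  set g : String → List String :=
    fun t' => PySem.List.dedup ((p.filter (fun q => q.1 == t')).map Prod.snd) with hg
  have htbl : pvSpecTbl p = ks.map (fun a => (a, g a)) := rfl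
  have hfilter : ∀ t' : String, (p ++ [(t, n)]).filter (fun q => q.1 == t')
      = p.filter (fun q => q.1 == t') ++ if t = t' then [(t, n)] else [] := by
    intro t'
    rw [List.filter_append]
    congr 1
    by_cases h : t = t'
    · subst h; simp [List.filter]
    · simp [List.filter, beq_false_of_ne h, h]
  by_cases hmem : t ∈ p.map Prod.fst
  · -- key already grouped
    have hkst : t ∈ ks := (PySem.List.mem_dedup _ _).2 hmem
    have hcur : (PySem.Dict.mk (pvSpecTbl p)).getD t [] = g t := by
      rw [htbl, pv_getD_keyed_map ks g t hnd, if_pos hkst]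
    have hkeys : PySem.List.dedup ((p ++ [(t, n)]).map Prod.fst) = ks := by
      simp only [List.map_append, List.map_cons, List.map_nil, hks,
        PySem.List.dedup_eq_ofList, PySem.Set.ofList_append_singleton]
      exact PySem.Set.add_of_mem ((PySem.Set.mem_ofList _ _).2 hmem)
    by_cases hn : n ∈ (p.filter (fun q => q.1 == t)).map Prod.snd
    · -- duplicate name: A leaves the dict alone, the table is unchanged too
      have hA : pvStepP (PySem.Dict.mk (pvSpecTbl p)) (t, n) = PySem.Dict.mk (pvSpecTbl p) := by
        simp only [pvStepP, hcur]
        rw [if_pos ((PySem.List.mem_dedup _ _).2 hn)]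
      rw [hA]
      congr 1
      unfold pvSpecTbl
      rw [hkeys, ← hks]
      apply List.map_congr_left
      intro t' _
      refine congrArg _ ?_
      rw [hfilter t']
      by_cases h : t = t'
      · subst h
        rw [if_pos rfl]
        simp only [List.map_append, List.map_cons, List.map_nil]
        rw [pv_dedup_append_singleton, if_pos hn]
      · simp [h]
    · -- new name for a known task: insert rewrites that key's value in place
      have hc : (PySem.Dict.mk (pvSpecTbl p)).contains t = true := by
        rw [htbl, pv_contains_keyed_map ks g t hnd]; simp [hkst]
      have hA : pvStepP (PySem.Dict.mk (pvSpecTbl p)) (t, n)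
          = (PySem.Dict.mk (pvSpecTbl p)).insert t (g t ++ [n]) := by
        simp only [pvStepP, hcur]
        rw [if_neg (fun hm => hn ((PySem.List.mem_dedup _ _).1 hm))]
      apply PySem.Dict.ext
      rw [hA, PySem.Dict.items_insert_of_contains _ _ hc]
      show ((pvSpecTbl p).map _ : List (String × List String)) = pvSpecTbl (p ++ [(t, n)])
      unfold pvSpecTbl
      rw [hkeys, ← hks, List.map_map]
      apply List.map_congr_left
      intro t' ht'
      by_cases h : t' = t
      · subst h
        simp only [Function.comp_apply, beq_self_eq_true, if_true]
        refine congrArg _ ?_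
        simp only [hg]
        rw [hfilter t', if_pos rfl]
        simp only [List.map_append, List.map_cons, List.map_nil]
        rw [pv_dedup_append_singleton, if_neg hn]
      · simp only [Function.comp_apply]
        rw [if_neg (by simpa using h), hfilter t', if_neg (fun he => h he.symm)]
        simp
  · -- fresh task id: A appends a new entry, the table gains the key at the end
    have hkst : t ∉ ks := fun h => hmem ((PySem.List.mem_dedup _ _).1 h)
    have hc : (PySem.Dict.mk (pvSpecTbl p)).contains t = false := by
      rw [htbl, pv_contains_keyed_map ks g t hnd]; simp [hkst]
    have hcur : (PySem.Dict.mk (pvSpecTbl p)).getD t [] = [] := by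
      rw [htbl, pv_getD_keyed_map ks g t hnd, if_neg hkst]
    have hA : pvStepP (PySem.Dict.mk (pvSpecTbl p)) (t, n)
        = (PySem.Dict.mk (pvSpecTbl p)).insert t [n] := by
      simp only [pvStepP, hcur]
      rw [if_neg (List.not_mem_nil)]
      rfl
    have hkeys : PySem.List.dedup ((p ++ [(t, n)]).map Prod.fst) = ks ++ [t] := by
      simp only [List.map_append, List.map_cons, List.map_nil, hks,
        PySem.List.dedup_eq_ofList, PySem.Set.ofList_append_singleton]
      exact PySem.Set.add_of_not_mem (fun h => hmem ((PySem.Set.mem_ofList _ _).1 h))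
    apply PySem.Dict.ext
    rw [hA, PySem.Dict.items_insert_of_not_contains _ _ hc]
    show pvSpecTbl p ++ [(t, [n])] = pvSpecTbl (p ++ [(t, n)])
    unfold pvSpecTbl
    rw [hkeys, ← hks, List.map_append]
    congr 1
    · apply List.map_congr_left
      intro t' ht'
      have hne : t ≠ t' := fun he => hkst (he ▸ ht')
      rw [hfilter t', if_neg hne]
      simp
    · simp only [List.map_cons, List.map_nil]
      rw [hfilter t, if_pos rfl]
      have hpf : p.filter (fun q => q.1 == t) = [] := by
        rw [List.filter_eq_nil_iff]
        intro q hq hqt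
        exact hmem (List.mem_map.2 ⟨q, hq, by simpa using hqt⟩)
      rw [hpf]
      rfl

-- the pair-list fold builds exactly the closed-form table
theorem pv_fold_tbl (pairs : List (String × String)) :
    ∀ p : List (String × String),
      pairs.foldl pvStepP (PySem.Dict.mk (pvSpecTbl p)) = PySem.Dict.mk (pvSpecTbl (p ++ pairs)) := by
  induction pairs with
  | nil => intro p; simp
  | cons q rest ih =>
      intro p
      rw [List.foldl_cons, pv_step_tbl p q, ih (p ++ [q]), List.append_assoc]
      rfl

-- A's row loop is the pair-list fold over the derived truthy pairs
theorem pv_rows_to_pairs (rsrc_map : List (String × String)) (rows : List (List (String × String))) :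
    ∀ d, rows.foldl (pvStepA rsrc_map) d
      = ((rows.map (pvPair rsrc_map)).filter (fun q => q.2 != "")).foldl pvStepP d := by
  induction rows with
  | nil => intro d; rfl
  | cons row rest ih =>
      intro d
      simp only [List.foldl_cons, List.map_cons, List.filter_cons]
      by_cases hn : (pvPair rsrc_map row).2 = ""
      · have hA : pvStepA rsrc_map d row = d := by
          simp only [pvStepA, pvLookup]
          rw [if_neg (by simpa [pvPair] using hn)]
        rw [hA, hn]
        simpa using ih d
      · have hA : pvStepA rsrc_map d row = pvStepP d (pvPair rsrc_map row) := by
          simp only [pvStepA, pvStepP, pvLookup, pvPair]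
          rw [if_pos (by simpa [pvPair] using hn)]
        rw [hA, if_pos (by simpa using hn)]
        exact ih _

-- ===== VERDICT (by name: the statement is the Claim_ definition above) =====
theorem parse_taskrsrc_py_spec : Claim_equal_parse_taskrsrc_py := by
  intro rows rsrc_map _
  show parse_taskrsrc_py rows rsrc_map = parse_taskrsrc_py_alt rows rsrc_map
  unfold parse_taskrsrc_py parse_taskrsrc_py_alt
  rw [pv_rows_to_pairs rsrc_map rows PySem.Dict.empty]
  have h0 : PySem.Dict.empty = PySem.Dict.mk (pvSpecTbl ([] : List (String × String))) := rfl
  rw [h0, pv_fold_tbl _ []]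
  rfl
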